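-- pv_equiv track=rewrite | github.com/CFeenan/LeetCode_Solutions | BitMapHoles.py | bitmap
-- ===== SOURCE A (Python) =====
-- def bitmap(strArr): # Function which counts the number of 'holes' in a bitmap ( 2D Array )
--     holes = 0
--     number_of_zeros_in_line = 0 # Keeps track of holes horizontally
--     y_track = 0
--     for line in strArr:
--         x_track = 0
--         for number in line:
--             if number == '0':
--                 if y_track > 0:
--                     if  strArr[y_track-1][x_track] == '0': # keeps track of holes vertically
--                         pass
--                     else:
--                         if number_of_zeros_in_line == 0:
--                             holes += 1
--                 else:
--                     if number_of_zeros_in_line > 0: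
--                         pass
--                     else:
--                         holes += 1
--                 number_of_zeros_in_line += 1
--             else:
--                 number_of_zeros_in_line = 0
--             x_track += 1
--         number_of_zeros_in_line = 0
--         y_track += 1
--     return holes
-- ===== SOURCE B (Python) =====
-- def bitmap(strArr):
--     # Inclusion-exclusion over four global pattern counts instead of a stateful scan:
--     # holes = #zeros - #horizontal 00 pairs - #vertical 00 pairs + #L-shaped triples.
--     zeros = sum(ch == '0' for line in strArr for ch in line)
--     horiz = sum(a == b == '0' for line in strArr for a, b in zip(line, line[1:]))
--     vert = sum(a == b == '0' for up, lo in zip(strArr, strArr[1:]) for a, b in zip(up, lo))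
--     corner = sum(a == b == c == '0' for up, lo in zip(strArr, strArr[1:])
--                  for a, b, c in zip(lo, lo[1:], up[1:]))
--     return zeros - horiz - vert + corner
-- ===== Notes on version B (the rewrite author's own statement) =====
-- stated objective: alternative
-- what changed: Replaced the stateful row-by-row scan (running zero-run flag, y_track/x_track counters, per-cell branching) by an inclusion-exclusion identity computed from four independent global pattern counts: total '0' cells, horizontal '00' pairs, vertical '00' pairs, and L-shaped '0' triples; holes = Z - H - V + L.
import Mathlib
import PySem

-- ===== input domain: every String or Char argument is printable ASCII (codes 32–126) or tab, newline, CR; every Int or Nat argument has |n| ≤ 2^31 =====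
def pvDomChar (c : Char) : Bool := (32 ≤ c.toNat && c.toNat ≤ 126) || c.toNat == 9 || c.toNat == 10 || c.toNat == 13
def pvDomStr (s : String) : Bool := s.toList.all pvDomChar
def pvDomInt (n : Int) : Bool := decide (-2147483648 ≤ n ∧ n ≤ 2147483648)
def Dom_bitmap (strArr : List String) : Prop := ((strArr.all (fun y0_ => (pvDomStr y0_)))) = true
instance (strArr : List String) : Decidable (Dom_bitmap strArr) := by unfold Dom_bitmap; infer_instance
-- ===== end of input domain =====

-- B counts holes by inclusion-exclusion over four independent global pattern counts
-- (zero cells, horizontal 00 pairs, vertical 00 pairs, L-shaped 000 triples) instead of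
-- A's stateful per-cell scan; an alternative algorithm of the same cost.

-- ===== PORT A =====
-- inner 'for number in line' loop; state = (holes, number_of_zeros_in_line, x_track).
-- pyGetD is used for strArr[y_track-1][x_track]: under Pre_bitmap both indices are in range,
-- so the default is never returned where Python A returns.
def bitmapInner (strArr : List String) (y : Int) : (Int × Int × Int) → List Char → (Int × Int × Int)
  | s, [] => s
  | (holes, zeros, x), c :: rest =>
    if c = '0' then
      let holes' :=
        if y > 0 then
          if PySem.List.pyGetD (PySem.List.pyGetD strArr (y - 1) "").toList x ' ' = '0' then holes
          else if zeros = 0 then holes + 1 else holes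
        else
          if zeros > 0 then holes else holes + 1
      bitmapInner strArr y (holes', zeros + 1, x + 1) rest
    else
      bitmapInner strArr y (holes, 0, x + 1) rest

-- outer 'for line in strArr' body: run the inner loop from x_track = 0, then reset
-- number_of_zeros_in_line to 0 and increment y_track.
def bitmapLine (strArr : List String) (s : Int × Int × Int) (line : String) : Int × Int × Int :=
  let t := bitmapInner strArr s.2.2 (s.1, s.2.1, 0) line.toList
  (t.1, 0, s.2.2 + 1)

def bitmap (strArr : List String) : Int :=
  (strArr.foldl (bitmapLine strArr) (0, 0, 0)).1

-- ===== PORT B =====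
-- zeros = sum(ch == '0' for line in strArr for ch in line), per line:
def czL (L : List Char) : Int := (L.countP (fun c => c == '0') : Int)
-- horiz = sum(a == b == '0' for a, b in zip(line, line[1:])), per line:
def clL (L : List Char) : Int := ((L.zip (L.drop 1)).countP (fun q => q.1 == '0' && q.2 == '0') : Int)
-- vert = sum(a == b == '0' for a, b in zip(up, lo)), per row pair (up, lo):
def cuL (U L : List Char) : Int := ((U.zip L).countP (fun q => q.1 == '0' && q.2 == '0') : Int)
-- corner = sum(a == b == c == '0' for a, b, c in zip(lo, lo[1:], up[1:])), per row pair: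
def cbL (U L : List Char) : Int :=
  (((L.zip (L.drop 1)).zip (U.drop 1)).countP (fun q => q.1.1 == '0' && q.1.2 == '0' && q.2 == '0') : Int)

def bitmap_alt (strArr : List String) : Int :=
  (strArr.map (fun l => czL l.toList)).sum
  - (strArr.map (fun l => clL l.toList)).sum
  - ((strArr.zip (strArr.drop 1)).map (fun p => cuL p.1.toList p.2.toList)).sum
  + ((strArr.zip (strArr.drop 1)).map (fun p => cbL p.1.toList p.2.toList)).sum

-- ===== PRECONDITION & SPEC =====
-- Pre_ excludes exactly the ragged bitmaps on which Python A raises IndexError: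
-- a '0' in row y ≥ 1 at a column x beyond the end of row y-1.
def Pre_bitmap (strArr : List String) : Prop :=
  ∀ y, (hy : y < strArr.length) → 0 < y →
    ∀ x, (hx : x < strArr[y].toList.length) →
      strArr[y].toList[x] = '0' → x < (strArr.getD (y - 1) "").toList.length
instance (strArr : List String) : Decidable (Pre_bitmap strArr) := by unfold Pre_bitmap; infer_instance

def pvWitness_bitmap : List String := ["0101", "1001", "1110"]

def Spec_bitmap (strArr : List String) (out : Int) : Prop := out = bitmap_alt strArr
instance (strArr : List String) (out : Int) : Decidable (Spec_bitmap strArr out) := by unfold Spec_bitmap; infer_instance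

-- ===== CLAIM (what is proved, stated in full; the proofs are below) =====
def Claim_equal_bitmap : Prop := ∀ (strArr : List String), Dom_bitmap strArr → Pre_bitmap strArr → Spec_bitmap strArr (bitmap strArr)

-- ===== LEMMAS AND PROOFS =====

-- reference: one row scanned with the aligned remainder of the upper row and a
-- "previous char was '0'" flag; [] stands for "no upper row".
def gRow (U : List Char) (L : List Char) (lz : Bool) : Int :=
  match L with
  | [] => 0
  | c :: t =>
    (if c = '0' ∧ lz = false ∧ ¬ (U.head?.getD ' ' = '0') then 1 else 0) + gRow U.tail t (c == '0')

def refAux : List Char → List String → Int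
  | _, [] => 0
  | U, L :: rest => gRow U L.toList false + refAux L.toList rest

-- per-row inclusion-exclusion, threaded form (p = char left of the row's first cell,
-- x = an arbitrary char above-left; cbL ignores its first upper char)
lemma g_master (L : List Char) : ∀ (U : List Char) (p x : Char),
    gRow U L (p == '0') = czL L - clL (p :: L) - cuL U L + cbL (x :: U) (p :: L) := by
  induction L with
  | nil => intro U p x; simp [gRow, czL, clL, cuL, cbL]
  | cons c t ih =>
    intro U p x
    cases U with
    | nil =>
      have h := ih [] c x
      simp only [gRow, List.tail_nil, List.head?_nil, Option.getD_none] at h ⊢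
      rw [h]
      simp only [czL, clL, cuL, cbL, List.drop_succ_cons, List.drop_zero, List.zip_cons_cons,
        List.countP_cons, List.zip_nil_left, List.zip_nil_right, List.countP_nil]
      by_cases hc : c = '0' <;> by_cases hp : p = '0' <;>
        simp [hc, hp] <;> ring
    | cons u U' =>
      have h := ih U' c u
      simp only [gRow, List.tail_cons, List.head?_cons, Option.getD_some] at h ⊢
      rw [h]
      simp only [czL, clL, cuL, cbL, List.drop_succ_cons, List.drop_zero, List.zip_cons_cons,
        List.countP_cons]
      by_cases hc : c = '0' <;> by_cases hp : p = '0' <;> by_cases hu : u = '0' <;>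
        simp [hc, hp, hu] <;> ring

lemma clL_pad (L : List Char) : clL ('x' :: L) = clL L := by
  cases L with
  | nil => simp [clL]
  | cons c t => simp [clL, List.zip_cons_cons]

lemma cbL_pad (U L : List Char) : cbL ('x' :: U) ('x' :: L) = cbL U L := by
  cases L with
  | nil => simp [cbL]
  | cons c t =>
    cases U with
    | nil => simp [cbL, List.zip_nil_right]
    | cons u U' => simp [cbL, List.zip_cons_cons]

lemma g_row_false (U L : List Char) :
    gRow U L false = czL L - clL L - cuL U L + cbL U L := by
  have h := g_master L U 'x' 'x'
  have hx : ('x' == '0') = false := by decide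
  rw [hx] at h
  rw [h, clL_pad, cbL_pad]

-- A's inner loop computes gRow over the remainder of the row
lemma innerA (strArr : List String) (y : Int) (P : List Char)
    (hP : P = if 0 < y then (PySem.List.pyGetD strArr (y - 1) "").toList else []) :
    ∀ (rest : List Char) (x : Nat) (holes zeros : Int), 0 ≤ zeros →
      (bitmapInner strArr y (holes, zeros, (x : Int)) rest).1
        = holes + gRow (P.drop x) rest (!(zeros == 0)) := by
  intro rest
  induction rest with
  | nil => intro x holes zeros _; simp [bitmapInner, gRow]
  | cons c t ih =>
    intro x holes zeros hz
    have hup : (P.drop x).head?.getD ' ' = P[x]?.getD ' ' := by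
      rw [List.head?_drop]
    have htail : (P.drop x).tail = P.drop (x + 1) := by
      rw [← List.drop_drop]; simp
    have hcast : ((x : Int) + 1) = ((x + 1 : Nat) : Int) := by push_cast; ring
    by_cases hc : c = '0'
    · subst hc
      have hnz : (!((zeros + 1 : Int) == 0)) = true := by simp; omega
      simp only [bitmapInner, reduceIte]
      rw [hcast, ih (x + 1) _ (zeros + 1) (by omega)]
      simp only [gRow, htail, hnz]
      have hch : (('0' : Char) == '0') = true := by decide
      rw [hch]
      by_cases hy : 0 < y
      · rw [if_pos hy] at hP ⊢
        have hPx : PySem.List.pyGetD (PySem.List.pyGetD strArr (y - 1) "").toList (x : Int) ' '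
            = P[x]?.getD ' ' := by
          rw [hP]; simp [PySem.List.pyGetD_natCast, List.getD]
        rw [hPx, hup]
        by_cases hu : P[x]?.getD ' ' = '0'
        · simp [hu]
        · by_cases hz0 : zeros = 0 <;> simp [hu, hz0] <;> ring
      · rw [if_neg hy]
        have hP0 : P = [] := by rw [hP, if_neg hy]
        by_cases hz0 : zeros = 0
        · rw [if_neg (by omega : ¬ zeros > 0)]
          simp [hP0, hz0]; ring
        · rw [if_pos (by omega : zeros > 0)]
          simp [hP0, hz0]
    · simp only [bitmapInner, if_neg hc]
      rw [hcast, ih (x + 1) holes 0 le_rfl]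
      have hcc : (c == '0') = false := by simp [hc]
      simp [gRow, htail, hc, hcc]

-- A's outer fold computes refAux
lemma outerA (strArr : List String) :
    ∀ (lines : List String) (y : Nat) (holes : Int),
      strArr.drop y = lines →
      (lines.foldl (bitmapLine strArr) (holes, 0, (y : Int))).1
        = holes + refAux (if 0 < y then (strArr.getD (y - 1) "").toList else []) lines := by
  intro lines
  induction lines with
  | nil => intro y holes _; simp [refAux]
  | cons L ls ih =>
    intro y holes hdrop
    have hPy : (if 0 < (y : Int) then (PySem.List.pyGetD strArr ((y : Int) - 1) "").toList else [])
        = (if 0 < y then (strArr.getD (y - 1) "").toList else []) := by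
      by_cases hy : 0 < y
      · rw [if_pos (by exact_mod_cast hy), if_pos hy]
        have : ((y : Int) - 1) = ((y - 1 : Nat) : Int) := by omega
        rw [this, PySem.List.pyGetD_natCast]
      · rw [if_neg (by exact_mod_cast hy), if_neg hy]
    have hinner := innerA strArr (y : Int)
      (if 0 < y then (strArr.getD (y - 1) "").toList else []) hPy.symm L.toList 0 holes 0 le_rfl
    have hgetL : strArr[y]? = some L := by
      rw [← List.head?_drop, hdrop]; rfl
    have hdrop' : strArr.drop (y + 1) = ls := by
      rw [← List.drop_drop, hdrop]; rfl
    have hnext := ih (y + 1) (bitmapInner strArr (y : Int) (holes, 0, 0) L.toList).1 hdrop'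
    simp only [List.foldl_cons, bitmapLine]
    have hc1 : ((y : Int) + 1) = ((y + 1 : Nat) : Int) := by push_cast; ring
    rw [hc1, hnext]
    simp only [Nat.cast_zero] at hinner
    rw [hinner]
    have : (if 0 < y + 1 then (strArr.getD (y + 1 - 1) "").toList else []) = L.toList := by
      simp [List.getD, hgetL]
    rw [this]
    simp only [refAux, List.drop_zero]
    have hb : (!((0 : Int) == 0)) = false := by decide
    rw [hb]
    ring

-- regrouping refAux into B's four global sums
lemma refAux_sum : ∀ (rows : List String) (u : String),
    refAux u.toList rows
      = (rows.map (fun l => czL l.toList)).sum - (rows.map (fun l => clL l.toList)).sum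
        - (((u :: rows).zip rows).map (fun p => cuL p.1.toList p.2.toList)).sum
        + (((u :: rows).zip rows).map (fun p => cbL p.1.toList p.2.toList)).sum := by
  intro rows
  induction rows with
  | nil => intro u; simp [refAux]
  | cons L rest ih =>
    intro u
    simp only [refAux, List.zip_cons_cons, List.map_cons, List.sum_cons]
    rw [ih L, g_row_false]
    ring

-- ===== VERDICT (by name: the statement is the Claim_ definition above) =====
theorem bitmap_spec : Claim_equal_bitmap := by
  intro strArr _ _
  unfold Spec_bitmap bitmap
  have h0 := outerA strArr strArr 0 0 rfl
  simp only [Nat.cast_zero] at h0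
  rw [h0, if_neg (by omega : ¬ (0:Nat) < 0), zero_add]
  cases strArr with
  | nil => simp [refAux, bitmap_alt]
  | cons L rest =>
    simp only [refAux]
    rw [g_row_false, refAux_sum rest L]
    have hcu : cuL [] L.toList = 0 := by simp [cuL]
    have hcb : cbL [] L.toList = 0 := by simp [cbL, List.zip_nil_right]
    simp only [bitmap_alt, List.drop_succ_cons, List.drop_zero, List.map_cons, List.sum_cons, hcu, hcb]
    ring
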